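-- pv_equiv track=rewrite | github.com/winvu88888888-maker/tinnam888888 | test_column_forensic.py | m_knn_delta
-- ===== SOURCE A (Python) =====
-- from collections import Counter, defaultdict
--
-- MAX_NUM = 45
--
-- def m_delta_mode(h, pos, w=50):
--     """Most common delta (change between consecutive draws)."""
--     vals = [x[pos] for x in h[-w:]]
--     deltas = [vals[i+1]-vals[i] for i in range(len(vals)-1)]
--     if not deltas: return vals[-1]
--     d = Counter(deltas).most_common(1)[0][0]
--     return max(1, min(MAX_NUM, vals[-1] + d))
--
-- def m_knn_delta(h, pos, k=5):
--     """KNN on delta sequence: find similar delta patterns."""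
--     vals = [x[pos] for x in h[-100:]]
--     if len(vals) < 10: return h[-1][pos]
--     deltas = [vals[i+1]-vals[i] for i in range(len(vals)-1)]
--     last_d = deltas[-3:] if len(deltas) >= 3 else deltas
--     preds = Counter()
--     for i in range(len(deltas)-len(last_d)-1):
--         seg = deltas[i:i+len(last_d)]
--         if seg == last_d and i+len(last_d) < len(deltas):
--             next_d = deltas[i+len(last_d)]
--             preds[vals[-1] + next_d] += 1
--     if preds:
--         v = preds.most_common(1)[0][0]
--         return max(1, min(MAX_NUM, v))
--     return m_delta_mode(h, pos)
-- ===== SOURCE B (Python) =====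
-- MAX_NUM = 45
--
-- def m_delta_mode(h, pos, w=50):
--     """Most common delta, via a plain counting dict and max(key=...)."""
--     vals = [row[pos] for row in h[-w:]]
--     deltas = [b - a for a, b in zip(vals, vals[1:])]
--     if not deltas:
--         return vals[-1]
--     counts = {}
--     for d in deltas:
--         counts[d] = counts.get(d, 0) + 1
--     best = max(counts, key=counts.get)
--     return max(1, min(MAX_NUM, vals[-1] + best))
--
-- def m_knn_delta(h, pos, k=5):
--     """Sliding-suffix KNN: walk the delta list by suffixes collecting followers,
--     then pick the most common prediction with a counting dict + max(key=...)."""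
--     vals = [row[pos] for row in h[-100:]]
--     if len(vals) < 10:
--         return h[-1][pos]
--     deltas = [b - a for a, b in zip(vals, vals[1:])]
--     tail = deltas[len(deltas) - 3:]
--     followers = []
--     rest = deltas
--     while len(rest) >= 5:
--         if rest[:3] == tail:
--             followers.append(rest[3])
--         rest = rest[1:]
--     if not followers:
--         return m_delta_mode(h, pos)
--     counts = {}
--     for d in followers:
--         p = vals[-1] + d
--         counts[p] = counts.get(p, 0) + 1
--     return max(1, min(MAX_NUM, max(counts, key=counts.get)))
-- ===== Notes on version B (the rewrite author's own statement) =====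
-- stated objective: alternative
-- what changed: Replaces A's range(i)-indexed scan that compares each window while incrementing a Counter in-loop by a staged pipeline: deltas come from zip(vals, vals[1:]) instead of indexing, a sliding-suffix while-loop (rest = rest[1:]) collects follower deltas first, and the winner is then picked with a plain counting dict plus max(counts, key=counts.get) instead of Counter.most_common; m_delta_mode is restructured the same way.
import Mathlib
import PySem

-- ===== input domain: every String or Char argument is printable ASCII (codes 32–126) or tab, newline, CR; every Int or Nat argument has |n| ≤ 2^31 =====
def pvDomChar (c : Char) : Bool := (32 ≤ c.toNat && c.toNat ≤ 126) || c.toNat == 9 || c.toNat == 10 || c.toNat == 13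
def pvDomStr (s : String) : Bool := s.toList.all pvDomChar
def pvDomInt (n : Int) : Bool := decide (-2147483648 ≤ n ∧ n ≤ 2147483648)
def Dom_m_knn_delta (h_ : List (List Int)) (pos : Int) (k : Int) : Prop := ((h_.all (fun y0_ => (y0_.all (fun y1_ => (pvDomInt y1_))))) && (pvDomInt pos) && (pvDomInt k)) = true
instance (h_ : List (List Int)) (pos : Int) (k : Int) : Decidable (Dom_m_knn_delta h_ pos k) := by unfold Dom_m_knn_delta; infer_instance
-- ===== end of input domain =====

-- B replaces A's indexed scan-and-count loop by a sliding-suffix walk of the delta list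
-- that collects follower deltas, then a counting dict with a key-max; alternative decomposition.

-- ===== PORT A =====

-- vals = [x[pos] for x in h[-w:]]
def pvVals (h_ : List (List Int)) (pos : Int) (w : Int) : List Int :=
  (PySem.List.slice h_ (some (-w)) none).map (fun x => PySem.List.pyGetD x pos 0)

-- deltas = [vals[i+1]-vals[i] for i in range(len(vals)-1)]
def pvDeltas (vals : List Int) : List Int :=
  (PySem.List.pyRange 0 ((vals.length : Int) - 1) 1).map
    (fun i => PySem.List.pyGetD vals (i + 1) 0 - PySem.List.pyGetD vals i 0)

-- Counter.most_common(1)[0][0]: first key of maximal count (insertion order)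
def pvMostCommon1 (d : PySem.Dict Int Int) : Int :=
  match PySem.List.max? d.items (fun p => p.2) with
  | some p => p.1
  | none => 0

-- A's m_delta_mode(h, pos, w=50)
def mDeltaMode (h_ : List (List Int)) (pos : Int) (w : Int) : Int :=
  let vals := pvVals h_ pos w
  let deltas := pvDeltas vals
  if deltas = [] then PySem.List.pyGetD vals (-1) 0
  else max 1 (min 45 (PySem.List.pyGetD vals (-1) 0 + pvMostCommon1 (PySem.Dict.counter deltas)))

def m_knn_delta (h_ : List (List Int)) (pos : Int) (k : Int) : Int :=
  let vals := pvVals h_ pos 100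
  if vals.length < 10 then PySem.List.pyGetD (PySem.List.pyGetD h_ (-1) []) pos 0
  else
    let deltas := pvDeltas vals
    let lastD := if 3 ≤ deltas.length then PySem.List.slice deltas (some (-3)) none else deltas
    let L : Int := (lastD.length : Int)
    let preds := (PySem.List.pyRange 0 ((deltas.length : Int) - L - 1) 1).foldl
      (fun d i =>
        if PySem.List.slice deltas (some i) (some (i + L)) == lastD
            && decide (i + L < (deltas.length : Int)) then
          d.modify (PySem.List.pyGetD vals (-1) 0 + PySem.List.pyGetD deltas (i + L) 0) 0 (· + 1)
        else d)
      PySem.Dict.empty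
    if preds.items = [] then mDeltaMode h_ pos 50
    else max 1 (min 45 (pvMostCommon1 preds))

-- ===== PORT B =====

-- vals = [row[pos] for row in h[-w:]]  (h[-w:] with w > 0 is drop (len - w); see PySem.List.slice_from_neg_ofNat)
def bVals (h_ : List (List Int)) (pos : Int) (w : Nat) : List Int :=
  (h_.drop (h_.length - w)).map (fun row => PySem.List.pyGetD row pos 0)

-- deltas = [b - a for a, b in zip(vals, vals[1:])]
def bDeltas (vals : List Int) : List Int :=
  List.zipWith (fun a b => b - a) vals vals.tail

-- counts = {}; for d in xs: counts[d] = counts.get(d, 0) + 1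
def bCounts (xs : List Int) : PySem.Dict Int Int :=
  xs.foldl (fun d x => d.modify x 0 (· + 1)) PySem.Dict.empty

-- max(counts, key=counts.get): first key of maximal count, in insertion order
def bKeyMax (counts : PySem.Dict Int Int) : Int :=
  match PySem.List.max? counts.keys (fun p => counts.getD p 0) with
  | some b => b
  | none => 0   -- unreachable: max() is only called on a non-empty dict

-- B's m_delta_mode
def bDeltaMode (h_ : List (List Int)) (pos : Int) (w : Nat) : Int :=
  let vals := bVals h_ pos w
  let deltas := bDeltas vals
  if deltas = [] then vals.getLastD 0
  else max 1 (min 45 (vals.getLastD 0 + bKeyMax (bCounts deltas)))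

-- while len(rest) >= 5: if rest[:3] == tail: followers.append(rest[3]); rest = rest[1:]
def bFollow (t : List Int) (rest : List Int) : List Int :=
  if 5 ≤ rest.length then
    (if rest.take 3 == t then [rest.getD 3 0] else []) ++ bFollow t rest.tail
  else []
termination_by rest.length
decreasing_by simp; omega

def m_knn_delta_alt (h_ : List (List Int)) (pos : Int) (k : Int) : Int :=
  let vals := bVals h_ pos 100
  if vals.length < 10 then PySem.List.pyGetD (h_.getLastD []) pos 0
  else
    let deltas := bDeltas vals
    let followers := bFollow (deltas.drop (deltas.length - 3)) deltas
    if followers = [] then bDeltaMode h_ pos 50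
    else
      let counts := followers.foldl
        (fun d x => d.modify (vals.getLastD 0 + x) 0 (· + 1)) PySem.Dict.empty
      max 1 (min 45 (bKeyMax counts))

-- ===== PRECONDITION & SPEC =====
-- Pre_ excludes exactly the inputs where Python A raises IndexError: empty history
-- (h[-1]) or a row among the last 100 that pos does not index.
def Pre_m_knn_delta (h_ : List (List Int)) (pos : Int) (k : Int) : Prop :=
  h_ ≠ [] ∧ ∀ x ∈ h_.drop (h_.length - 100), PySem.Raise.InRange x.length pos
instance (h_ : List (List Int)) (pos : Int) (k : Int) : Decidable (Pre_m_knn_delta h_ pos k) := by unfold Pre_m_knn_delta; infer_instance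

def pvWitness_m_knn_delta : List (List Int) × Int × Int :=
  ([[1], [3], [2], [4], [1], [3], [2], [4], [1], [3], [2]], 0, 5)

def Spec_m_knn_delta (h_ : List (List Int)) (pos : Int) (k : Int) (out : Int) : Prop := out = m_knn_delta_alt h_ pos k
instance (h_ : List (List Int)) (pos : Int) (k : Int) (out : Int) : Decidable (Spec_m_knn_delta h_ pos k out) := by unfold Spec_m_knn_delta; infer_instance

-- ===== CLAIM (what is proved, stated in full; the proofs are below) =====
def Claim_equal_m_knn_delta : Prop := ∀ (h_ : List (List Int)) (pos : Int) (k : Int), Dom_m_knn_delta h_ pos k → Pre_m_knn_delta h_ pos k → Spec_m_knn_delta h_ pos k (m_knn_delta h_ pos k)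

-- ===== LEMMAS AND PROOFS =====

theorem pv_foldl_add_ne_nil {α : Type} [BEq α] (t s : List α) (hs : s ≠ []) :
    t.foldl PySem.Set.add s ≠ [] := by
  induction t generalizing s with
  | nil => exact hs
  | cons b t ih =>
    intro h
    apply ih (PySem.Set.add s b) ?_ h
    unfold PySem.Set.add
    split <;> simp_all

theorem counter_items_eq_nil {α : Type} [BEq α] [LawfulBEq α] (xs : List α) :
    (PySem.Dict.counter xs).items = [] ↔ xs = [] := by
  rw [PySem.Dict.items_counter]
  cases xs with
  | nil => simp [PySem.Set.ofList]
  | cons a t =>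
    simp only [List.map_eq_nil_iff, PySem.Set.ofList]
    constructor
    · intro h
      exact absurd h (by
        have := pv_foldl_add_ne_nil t [a] (by simp)
        simpa [PySem.Set.add, List.foldl_cons] using this)
    · intro h; cases h

-- max? over a mapped list is the mapped max? over the original list
theorem pv_max?_map {α β κ : Type} [LT κ] [DecidableLT κ] (g : α → β) (key : β → κ)
    (l : List α) :
    PySem.List.max? (l.map g) key = (PySem.List.max? l (fun a => key (g a))).map g := by
  unfold PySem.List.max?
  suffices h : ∀ (acc : Option α),
      (l.map g).foldl
        (fun acc x => match acc with
          | none => some x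
          | some m => if key m < key x then some x else some m) (acc.map g)
      = (l.foldl
        (fun acc x => match acc with
          | none => some x
          | some m => if key (g m) < key (g x) then some x else some m) acc).map g by
    simpa using h none
  induction l with
  | nil => intro acc; simp
  | cons a t ih =>
    intro acc
    cases acc with
    | none => simpa using ih (some a)
    | some m =>
      simp only [List.map_cons, List.foldl_cons, Option.map_some]
      by_cases hlt : key (g m) < key (g a)
      · rw [if_pos hlt, if_pos hlt]; exact ih (some a)
      · rw [if_neg hlt, if_neg hlt]; exact ih (some m)

-- xs[-1] with a default is getLastD
theorem pv_pyGetD_neg_one {α : Type} (xs : List α) (d : α) :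
    PySem.List.pyGetD xs (-1) d = xs.getLastD d := by
  cases xs with
  | nil => rfl
  | cons a t =>
    simp [PySem.List.pyGetD, PySem.List.pyGet?, PySem.List.pyIdx?, List.getLastD_eq_getLast?,
      List.getLast?_eq_getElem?]

-- A's indexed delta comprehension equals B's zip form
theorem pv_deltas_eq (vals : List Int) : pvDeltas vals = bDeltas vals := by
  unfold pvDeltas bDeltas
  cases vals with
  | nil => rfl
  | cons a t =>
    have hlen : ((a :: t).length : Int) - 1 = ((t.length : Nat) : Int) := by
      simp
    rw [hlen, PySem.List.pyRange_zero_natCast, List.map_map]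
    apply List.ext_getElem
    · simp
    · intro i h1 h2
      simp only [List.getElem_map, List.getElem_range, Function.comp_apply,
        List.getElem_zipWith]
      have hc : ((i : Nat) : Int) + 1 = (((i + 1 : Nat)) : Int) := by push_cast; ring
      rw [hc, PySem.List.pyGetD_natCast, PySem.List.pyGetD_natCast]
      have hi : i < t.length := by simpa using h2
      rw [List.getD_eq_getElem _ _ (by simpa using Nat.succ_lt_succ hi),
          List.getD_eq_getElem _ _ (by simp; omega)]
      simp

-- B's suffix walk collects exactly the followers of matching windows, by index
theorem bFollow_eq (t : List Int) (xs : List Int) :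
    bFollow t xs
      = ((List.range (xs.length - 4)).filter
          (fun i => (xs.drop i).take 3 == t)).map (fun i => (xs.drop i).getD 3 0) := by
  induction xs with
  | nil => rw [bFollow]; rfl
  | cons a xs' ih =>
    rw [bFollow]
    by_cases h5 : 5 ≤ (a :: xs').length
    · rw [if_pos h5]
      have hn : (a :: xs').length - 4 = (xs'.length - 4) + 1 := by
        simp at h5 ⊢; omega
      rw [hn, List.range_succ_eq_map]
      simp only [List.tail_cons]
      rw [ih, List.filter_cons]
      by_cases ht : (List.take 3 (List.drop 0 (a :: xs')) == t) = true
      · rw [if_pos ht, List.map_cons, List.filter_map, List.map_map]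
        simp only [List.drop_zero] at ht
        rw [if_pos ht]
        rfl
      · rw [if_neg ht, List.filter_map, List.map_map]
        simp only [List.drop_zero] at ht
        rw [if_neg ht]
        rfl
    · rw [if_neg h5]
      have hn : (a :: xs').length - 4 = 0 := by simp at h5 ⊢; omega
      rw [hn]
      rfl

-- most_common(1)[0][0] of a counter equals max(counts, key=counts.get) on its keys
theorem pv_mostCommon_eq_keyMax (xs : List Int) (hx : xs ≠ []) :
    pvMostCommon1 (PySem.Dict.counter xs) = bKeyMax (PySem.Dict.counter xs) := by
  unfold pvMostCommon1 bKeyMax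
  rw [PySem.Dict.items_eq_map_keys (PySem.Dict.counter xs) (PySem.Dict.nodup_keys_counter xs) 0,
      pv_max?_map]
  cases hm : PySem.List.max? (PySem.Dict.counter xs).keys
      (fun a => ((a, (PySem.Dict.counter xs).getD a 0)).2) with
  | none =>
    exfalso
    rw [PySem.List.max?_eq_none_iff] at hm
    rw [PySem.Dict.keys_counter] at hm
    cases xs with
    | nil => exact hx rfl
    | cons a t =>
      exact pv_foldl_add_ne_nil t [a] (by simp)
        (by simpa [PySem.Set.ofList, PySem.Set.add, List.foldl_cons] using hm)
  | some b => rfl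

-- the two vals comprehensions agree (h[-w:] is drop (len - w))
theorem pv_vals_eq100 (h_ : List (List Int)) (pos : Int) :
    bVals h_ pos 100 = pvVals h_ pos 100 := by
  unfold pvVals bVals
  rw [PySem.List.slice_from_neg_ofNat h_ 100 (by norm_num)]

theorem pv_vals_eq50 (h_ : List (List Int)) (pos : Int) :
    bVals h_ pos 50 = pvVals h_ pos 50 := by
  unfold pvVals bVals
  rw [PySem.List.slice_from_neg_ofNat h_ 50 (by norm_num)]

-- the two m_delta_mode helpers agree
theorem pv_mode_eq (h_ : List (List Int)) (pos : Int) :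
    mDeltaMode h_ pos 50 = bDeltaMode h_ pos 50 := by
  unfold mDeltaMode bDeltaMode
  dsimp only
  rw [pv_vals_eq50 h_ pos, ← pv_deltas_eq, pv_pyGetD_neg_one]
  by_cases hnil : pvDeltas (pvVals h_ pos 50) = []
  · simp [hnil]
  · simp only [hnil, if_false]
    have hc : bCounts (pvDeltas (pvVals h_ pos 50))
        = PySem.Dict.counter (pvDeltas (pvVals h_ pos 50)) := rfl
    rw [hc, ← pv_mostCommon_eq_keyMax _ hnil]

-- filter/map congruence on a common index list
theorem pv_map_filter_congr {α β : Type} (l : List α) (p q : α → Bool) (f g : α → β)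
    (hp : ∀ x ∈ l, p x = q x) (hf : ∀ x ∈ l, f x = g x) :
    (l.filter p).map f = (l.filter q).map g := by
  rw [List.filter_congr hp]
  exact List.map_congr_left (fun x hx => hf x (List.mem_of_mem_filter hx))

-- A's counting fold over matching windows is the Counter of B's follower predictions
theorem pv_fold_eq (deltas t : List Int) (vlast : Int) (h9 : 9 ≤ deltas.length) :
    (PySem.List.pyRange 0 ((deltas.length : Int) - ((3 : Nat) : Int) - 1) 1).foldl
      (fun d i =>
        if PySem.List.slice deltas (some i) (some (i + ((3 : Nat) : Int))) == t
            && decide (i + ((3 : Nat) : Int) < (deltas.length : Int)) then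
          d.modify (vlast + PySem.List.pyGetD deltas (i + ((3 : Nat) : Int)) 0) 0 (· + 1)
        else d)
      PySem.Dict.empty
    = PySem.Dict.counter ((bFollow t deltas).map (fun x => vlast + x)) := by
  rw [PySem.List.foldl_congr_mem _ _
    (fun (d : PySem.Dict Int Int) (i : Int) =>
      if PySem.List.slice deltas (some i) (some (i + ((3 : Nat) : Int))) == t then
        d.modify (vlast + PySem.List.pyGetD deltas (i + ((3 : Nat) : Int)) 0) 0 (· + 1)
      else d) _
    (by
      intro acc i hi
      have hb := PySem.List.mem_pyRange_one.mp hi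
      have hd : decide (i + ((3 : Nat) : Int) < (deltas.length : Int)) = true := by
        simp only [decide_eq_true_eq]
        omega
      rw [hd, Bool.and_true])]
  rw [PySem.List.foldl_if_eq_foldl_filter]
  have hlist : ((PySem.List.pyRange 0 ((deltas.length : Int) - ((3 : Nat) : Int) - 1) 1).filter
        (fun i => PySem.List.slice deltas (some i) (some (i + ((3 : Nat) : Int))) == t)).map
        (fun i => vlast + PySem.List.pyGetD deltas (i + ((3 : Nat) : Int)) 0)
      = (bFollow t deltas).map (fun x => vlast + x) := by
    rw [show (deltas.length : Int) - ((3 : Nat) : Int) - 1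
        = ((deltas.length - 4 : Nat) : Int) by omega]
    rw [PySem.List.pyRange_zero_natCast, List.filter_map, List.map_map, bFollow_eq,
      List.map_map]
    apply pv_map_filter_congr
    · intro j _
      simp only [Function.comp_apply]
      rw [PySem.List.slice_natCast_add deltas j 3]
    · intro j _
      simp only [Function.comp_apply]
      rw [show ((j : Nat) : Int) + ((3 : Nat) : Int) = (((j + 3 : Nat)) : Int) by omega,
        PySem.List.pyGetD_natCast]
      simp [List.getD, List.getElem?_drop]
  rw [PySem.Dict.counter_eq_foldl, ← hlist, List.foldl_map]

-- main equivalence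
theorem m_knn_delta_eq_alt (h_ : List (List Int)) (pos : Int) (k : Int) :
    m_knn_delta h_ pos k = m_knn_delta_alt h_ pos k := by
  unfold m_knn_delta m_knn_delta_alt
  dsimp only
  rw [pv_vals_eq100 h_ pos, ← pv_deltas_eq]
  simp only [pv_pyGetD_neg_one]
  by_cases h10 : (pvVals h_ pos 100).length < 10
  · simp [h10]
  · simp only [h10, if_false]
    set vals := pvVals h_ pos 100 with hv
    set deltas := pvDeltas vals with hdl
    have hdlen : deltas.length = vals.length - 1 := by
      rw [hdl]; unfold pvDeltas
      rw [List.length_map, PySem.List.length_pyRange_one]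
      omega
    have h9 : 9 ≤ deltas.length := by omega
    have h3 : 3 ≤ deltas.length := by omega
    rw [if_pos h3, PySem.List.slice_from_neg_ofNat deltas 3 (by norm_num)]
    set t := deltas.drop (deltas.length - 3) with htd
    have hlen3 : t.length = 3 := by rw [htd, List.length_drop]; omega
    rw [hlen3]
    set vlast := vals.getLastD 0 with hvl
    rw [pv_fold_eq deltas t vlast h9]
    by_cases hf : bFollow t deltas = []
    · rw [hf]
      simp only [List.map_nil]
      rw [pv_mode_eq, if_pos (show (PySem.Dict.counter ([] : List Int)).items = [] from rfl),
        if_pos trivial]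
    · have hM : (bFollow t deltas).map (fun x => vlast + x) ≠ [] := by
        simpa using hf
      rw [if_neg (by simp only [counter_items_eq_nil]; exact hM), if_neg hf]
      have hcnt : (bFollow t deltas).foldl
          (fun d x => d.modify (vlast + x) 0 (· + 1)) PySem.Dict.empty
          = PySem.Dict.counter ((bFollow t deltas).map (fun x => vlast + x)) := by
        rw [PySem.Dict.counter_eq_foldl, List.foldl_map]
      rw [hcnt, pv_mostCommon_eq_keyMax _ hM]

-- ===== VERDICT (by name: the statement is the Claim_ definition above) =====
theorem m_knn_delta_spec : Claim_equal_m_knn_delta := by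
  intro h_ pos k _ _
  unfold Spec_m_knn_delta
  exact m_knn_delta_eq_alt h_ pos k
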